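-- pv_equiv track=rewrite | github.com/Gazzzzyyy/Python.Challenges | riddles_and_larger_problems/length_of_company_tasks.py | find_longest_paths
-- ===== SOURCE A (Python) =====
-- def find_longest_paths(tasks):
--     """
--     Find the longest possible trajectories in the project. If multiple trajectories have the same length, return all of them.
--
--     Args:
--     tasks (dict): The adjacency list of tasks and their dependencies.
--
--     Returns:
--     list: A list of lists, where each sublist represents a longest trajectory (critical path).
--     """
--
--     if "Start" not in tasks:
--         raise KeyError("Expected a start point for projects")
--
--     stack = [("Start", ["Start"])]
--
--     max_length = 0
--     longest_path = []
--
--     while stack: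
--
--         vertex, current_path = stack.pop()
--
--         if tasks[vertex]:
--
--             for neighbour in tasks[vertex]:
--                 stack.append((neighbour, current_path + [neighbour]))
--
--         else:
--
--             # nothing else to add. Find the length of path
--
--             current_length = len(current_path)
--
--             if current_length > max_length:
--                 max_length = current_length
--                 longest_path = [current_path]
--
--             else:
--                 # handle multiple paths of the same length
--                 longest_path.append(current_path)
--
--     return longest_path
-- ===== SOURCE B (Python) =====
-- def find_longest_paths(tasks):
--     """Recursive DFS with shared accumulators instead of an explicit LIFO stack."""
--     if "Start" not in tasks:
--         raise KeyError("Expected a start point for projects")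
--
--     max_length = 0
--     longest_path = []
--
--     def dfs(vertex, path):
--         nonlocal max_length, longest_path
--         if tasks[vertex]:
--             for neighbour in reversed(tasks[vertex]):
--                 dfs(neighbour, path + [neighbour])
--         else:
--             if len(path) > max_length:
--                 max_length = len(path)
--                 longest_path = [path]
--             else:
--                 longest_path.append(path)
--
--     dfs("Start", ["Start"])
--     return longest_path
-- ===== Notes on version B (the rewrite author's own statement) =====
-- stated objective: simpler
-- what changed: Replaces A's explicit LIFO stack of (vertex, partial path) pairs and while-loop by a recursive DFS helper with shared nonlocal accumulators, visiting children in reversed order so leaves are met in the same order.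
import Mathlib
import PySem

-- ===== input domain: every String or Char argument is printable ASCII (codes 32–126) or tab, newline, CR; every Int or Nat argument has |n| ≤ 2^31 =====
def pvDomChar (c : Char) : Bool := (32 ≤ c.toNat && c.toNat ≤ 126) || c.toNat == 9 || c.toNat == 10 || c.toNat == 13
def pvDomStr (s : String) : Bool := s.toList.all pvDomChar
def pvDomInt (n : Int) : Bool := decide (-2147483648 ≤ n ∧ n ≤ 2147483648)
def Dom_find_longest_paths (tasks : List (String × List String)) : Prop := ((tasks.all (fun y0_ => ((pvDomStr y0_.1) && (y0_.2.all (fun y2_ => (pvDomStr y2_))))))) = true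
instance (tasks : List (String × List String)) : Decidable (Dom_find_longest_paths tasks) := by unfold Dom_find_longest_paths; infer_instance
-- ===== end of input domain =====

-- B replaces A's explicit LIFO stack over partial paths by a recursive DFS with shared
-- selection accumulators; equal return values proved on Pre_ (exactly the inputs where
-- the Python A returns: elsewhere A raises KeyError or loops, and so does B).

-- ===== PORT A =====
-- shared helper (used by the termination guard of port A, by B's fuel and by Pre_):
-- height of each vertex in the dependency graph, computed as a table in
-- tasks.length + 1 rounds; an edge that strictly decreases it cannot lie on a cycle.
def pvRankStep (tasks : List (String × List String)) (d : PySem.Dict String Nat) :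
    PySem.Dict String Nat :=
  PySem.Dict.mk (tasks.map (fun p => (p.1, p.2.foldl (fun m c => max m (d.getD c 0 + 1)) 0)))

def pvRankIter (tasks : List (String × List String)) : Nat → PySem.Dict String Nat
  | 0 => PySem.Dict.mk []
  | f + 1 => pvRankStep tasks (pvRankIter tasks f)

def pvRankOf (tasks : List (String × List String)) (v : String) : Nat :=
  (pvRankIter tasks (tasks.length + 1)).getD v 0

def pvKeys (tasks : List (String × List String)) : List String := tasks.map (·.1)

-- base for the stack weight: strictly more than the length of any adjacency list
def pvB (tasks : List (String × List String)) : Nat :=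
  (tasks.map (fun p => p.2.length)).foldr max 0 + 2

-- weight of A's stack, decreasing along the loop (under the rank guard)
def pvWt (tasks : List (String × List String)) (stack : List (String × List String)) : Nat :=
  (stack.map (fun e => pvB tasks ^ pvRankOf tasks e.1)).sum

theorem pvMem_of_get?_mk {tasks : List (String × List String)} {v : String} {ch : List String}
    (h : (PySem.Dict.mk tasks).get? v = some ch) : (v, ch) ∈ tasks := by
  induction tasks with
  | nil => simp [PySem.Dict.get?] at h
  | cons p rest ih =>
      rw [show (p :: rest) = ((p.1, p.2) :: rest) from rfl, PySem.Dict.get?_mk_cons] at h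
      by_cases hp : (p.1 == v) = true
      · cases p
        simp only [hp, if_pos] at h
        simp_all
      · simp only [hp] at h
        simp only [Bool.false_eq_true, if_false] at h
        exact List.mem_cons_of_mem _ (ih h)

theorem pvLen_le_foldr_max {l : List Nat} {x : Nat} (h : x ∈ l) : x ≤ l.foldr max 0 := by
  induction l with
  | nil => simp at h
  | cons a t ih =>
      simp only [List.mem_cons] at h
      rcases h with rfl | h
      · simp
      · simp only [List.foldr_cons]; exact le_max_of_le_right (ih h)

-- the LIFO stack loop of A (top of the stack = head of the list)
def pvLoopA (tasks : List (String × List String)) (stack : List (String × List String))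
    (ml : Int) (lp : List (List String)) : List (List String) :=
  match stack with
  | [] => lp
  | (v, p) :: rest =>
    match hget : (PySem.Dict.mk tasks).get? v with
    | none => lp      -- Python raises KeyError here; excluded by Pre_
    | some ch =>
      if hch : ch ≠ [] then
        if hg : ch.all (fun c => pvRankOf tasks c < pvRankOf tasks v) = true then
          pvLoopA tasks (ch.reverse.map (fun c => (c, p ++ [c])) ++ rest) ml lp
        else lp       -- termination guard, never taken under Pre_ (cyclic input: Python loops forever)
      else
        if (p.length : Int) > ml then
          pvLoopA tasks rest (p.length : Int) [p]
        else
          pvLoopA tasks rest ml (lp ++ [p])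
termination_by pvWt tasks stack
decreasing_by
  · simp only [pvWt, List.map_append, List.sum_append, List.map_map, List.map_cons,
      List.sum_cons, Function.comp_def]
    have hr : ∀ c ∈ ch, pvRankOf tasks c < pvRankOf tasks v := by
      intro c hc; simpa using List.all_eq_true.mp hg c hc
    have hBpos : 0 < pvB tasks := by unfold pvB; omega
    have hv : 1 ≤ pvRankOf tasks v := by
      obtain ⟨c, hc⟩ := List.exists_mem_of_ne_nil ch hch
      have := hr c hc; omega
    have hlen : ch.length < pvB tasks := by
      have hm : ch.length ∈ tasks.map (fun p => p.2.length) :=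
        List.mem_map.mpr ⟨(v, ch), pvMem_of_get?_mk hget, rfl⟩
      have := pvLen_le_foldr_max hm
      simp only [pvB]; omega
    have hsum : (ch.reverse.map (fun c => pvB tasks ^ pvRankOf tasks c)).sum
        ≤ ch.length * pvB tasks ^ (pvRankOf tasks v - 1) := by
      have h1 : ∀ x ∈ ch.reverse.map (fun c => pvB tasks ^ pvRankOf tasks c),
          x ≤ pvB tasks ^ (pvRankOf tasks v - 1) := by
        intro x hx
        obtain ⟨c, hc, rfl⟩ := List.mem_map.mp hx
        exact Nat.pow_le_pow_right hBpos (by have := hr c (List.mem_reverse.mp hc); omega)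
      have := List.sum_le_card_nsmul _ _ h1
      simpa [List.length_map, List.length_reverse, Nat.smul_one_eq_cast] using this
    have hpow : ch.length * pvB tasks ^ (pvRankOf tasks v - 1) < pvB tasks ^ pvRankOf tasks v := by
      calc ch.length * pvB tasks ^ (pvRankOf tasks v - 1)
          < pvB tasks * pvB tasks ^ (pvRankOf tasks v - 1) := by
            exact (Nat.mul_lt_mul_right (Nat.pow_pos hBpos)).mpr hlen
        _ = pvB tasks ^ (pvRankOf tasks v - 1 + 1) := by rw [Nat.pow_succ]; ring
        _ = pvB tasks ^ pvRankOf tasks v := by congr 1; omega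
    omega
  · simp only [pvWt, List.map_cons, List.sum_cons]
    have : 0 < pvB tasks ^ pvRankOf tasks v := Nat.pow_pos (by unfold pvB; omega)
    omega
  · simp only [pvWt, List.map_cons, List.sum_cons]
    have : 0 < pvB tasks ^ pvRankOf tasks v := Nat.pow_pos (by unfold pvB; omega)
    omega

def find_longest_paths (tasks : List (String × List String)) : List (List String) :=
  if (PySem.Dict.mk tasks).contains "Start" = false then []   -- Python: raise KeyError; excluded by Pre_
  else pvLoopA tasks [("Start", ["Start"])] 0 []

-- ===== PORT B =====
-- B's recursive dfs, made total by a fuel argument (under Pre_ the fuel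
-- pvRankOf "Start" + 1 covers the whole recursion; Python B recurses directly)
def pvDfsF (tasks : List (String × List String)) :
    Nat → String → List String → Int × List (List String) → Int × List (List String)
  | 0, _, _, st => st     -- fuel exhausted: only a cyclic input (outside Pre_) reaches this
  | f + 1, v, path, st =>
    match (PySem.Dict.mk tasks).get? v with
    | none => st          -- Python: KeyError; excluded by Pre_
    | some ch =>
      if ch ≠ [] then
        ch.reverse.foldl (fun s c => pvDfsF tasks f c (path ++ [c]) s) st
      else
        if (path.length : Int) > st.1 then ((path.length : Int), [path])
        else (st.1, st.2 ++ [path])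

def find_longest_paths_alt (tasks : List (String × List String)) : List (List String) :=
  if (PySem.Dict.mk tasks).contains "Start" = false then []   -- Python: raise KeyError; excluded by Pre_
  else (pvDfsF tasks (pvRankOf tasks "Start" + 1) "Start" ["Start"] (0, [])).2

-- ===== PRECONDITION & SPEC =====
-- children list of a vertex ([] when the key is missing)
def pvChildren (tasks : List (String × List String)) (v : String) : List String :=
  ((PySem.Dict.mk tasks).get? v).getD []

-- fueled closure of {"Start"} under the children relation = the vertices reachable
-- from "Start"; the fuel (one more than the total number of listed dependencies)
-- always suffices, since each non-final step adds at least one new vertex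
def pvReachF (tasks : List (String × List String)) : Nat → List String
  | 0 => ["Start"]
  | f + 1 =>
    (pvReachF tasks f ++ (pvReachF tasks f).flatMap (pvChildren tasks)).dedup

def pvReach (tasks : List (String × List String)) : List String :=
  pvReachF tasks ((tasks.flatMap (·.2)).length + 1)

-- Pre_ = exactly the inputs on which the Python A returns: "Start" is a key and the part
-- of the graph REACHABLE from "Start" is complete (every reachable vertex is a key) and
-- acyclic (the fueled height strictly decreases along its edges, and the reachable set is
-- closed); elsewhere A raises KeyError or loops forever.  Defects in parts of the graph
-- unreachable from "Start" (missing or cyclic dependencies there) stay INSIDE Pre_.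
def Pre_find_longest_paths (tasks : List (String × List String)) : Prop :=
  "Start" ∈ pvKeys tasks ∧ "Start" ∈ pvReach tasks ∧
    ∀ v ∈ pvReach tasks, v ∈ pvKeys tasks ∧
      ∀ c ∈ pvChildren tasks v, c ∈ pvReach tasks ∧ pvRankOf tasks c < pvRankOf tasks v
-- e.g. the project [("Start", ["plan", "build"]), ("plan", ["test"]), ("build", []),
-- ("test", ["ship"]), ("ship", [])] satisfies Pre_, and still does with a defective
-- (cyclic or dangling) entry appended whose vertex is unreachable from the start.
instance (tasks : List (String × List String)) : Decidable (Pre_find_longest_paths tasks) := by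
  unfold Pre_find_longest_paths; infer_instance

def pvWitness_find_longest_paths : (List (String × List String)) :=
  [("Start", ["A", "B"]), ("A", ["B"]), ("B", []), ("junk", ["junk"])]

def Spec_find_longest_paths (tasks : List (String × List String)) (out : List (List String)) : Prop := out = find_longest_paths_alt tasks
instance (tasks : List (String × List String)) (out : List (List String)) : Decidable (Spec_find_longest_paths tasks out) := by unfold Spec_find_longest_paths; infer_instance

-- ===== CLAIM (what is proved, stated in full; the proofs are below) =====
def Claim_equal_find_longest_paths : Prop := ∀ (tasks : List (String × List String)), Dom_find_longest_paths tasks → Pre_find_longest_paths tasks → Spec_find_longest_paths tasks (find_longest_paths tasks)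

-- ===== LEMMAS AND PROOFS =====

-- fueled spec of the suffix paths rooted at v, in the shared exploration order
def pvSF (tasks : List (String × List String)) : Nat → String → List (List String)
  | 0, _ => []
  | f + 1, v =>
    match (PySem.Dict.mk tasks).get? v with
    | none => []
    | some ch =>
      if ch = [] then [[v]]
      else ch.reverse.flatMap (fun c => (pvSF tasks f c).map (fun s => v :: s))

def pvS (tasks : List (String × List String)) (v : String) : List (List String) :=
  pvSF tasks (pvRankOf tasks v + 1) v

-- A's (and B's) per-leaf selection step
def pvStepA (s : Int × List (List String)) (p : List String) : Int × List (List String) :=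
  if (p.length : Int) > s.1 then ((p.length : Int), [p]) else (s.1, s.2 ++ [p])

theorem pvGet_of_mem_keys {tasks : List (String × List String)} {v : String}
    (h : v ∈ pvKeys tasks) : ∃ ch, (PySem.Dict.mk tasks).get? v = some ch := by
  cases hg : (PySem.Dict.mk tasks).get? v with
  | none =>
      exfalso
      exact (PySem.Dict.get?_eq_none_iff_not_mem_keys _ _).mp hg (by simpa [pvKeys] using h)
  | some ch => exact ⟨ch, rfl⟩

-- under Pre_, every edge out of a reachable vertex leads to a reachable vertex of
-- strictly smaller rank
theorem pvEdges {tasks : List (String × List String)} (HP : Pre_find_longest_paths tasks)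
    {v : String} (hv : v ∈ pvReach tasks) {ch : List String}
    (hget : (PySem.Dict.mk tasks).get? v = some ch) :
    ∀ c ∈ ch, c ∈ pvReach tasks ∧ pvRankOf tasks c < pvRankOf tasks v := by
  intro c hc
  have := (HP.2.2 v hv).2 c (by simp [pvChildren, hget, hc])
  exact this

theorem pvReach_keys {tasks : List (String × List String)} (HP : Pre_find_longest_paths tasks)
    {v : String} (hv : v ∈ pvReach tasks) : v ∈ pvKeys tasks := (HP.2.2 v hv).1

theorem pvGuard {tasks : List (String × List String)} {v : String} {ch : List String}
    (he : ∀ c ∈ ch, c ∈ pvReach tasks ∧ pvRankOf tasks c < pvRankOf tasks v) :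
    ch.all (fun c => pvRankOf tasks c < pvRankOf tasks v) = true := by
  simp only [List.all_eq_true, decide_eq_true_eq]
  exact fun c hc => (he c hc).2

-- fuel irrelevance of pvSF above the rank, under Pre_
theorem pvSF_stable {tasks : List (String × List String)} (HP : Pre_find_longest_paths tasks) :
    ∀ (f₁ : Nat), ∀ {f₂ : Nat} {v : String}, v ∈ pvReach tasks →
      pvRankOf tasks v < f₁ → pvRankOf tasks v < f₂ →
      pvSF tasks f₁ v = pvSF tasks f₂ v := by
  intro f₁
  induction f₁ with
  | zero => intro f₂ v _ h1 _; omega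
  | succ f IH =>
      intro f₂ v hv h1 h2
      obtain ⟨f₂', rfl⟩ : ∃ f₂', f₂ = f₂' + 1 := ⟨f₂ - 1, by omega⟩
      obtain ⟨ch, hget⟩ := pvGet_of_mem_keys (pvReach_keys HP hv)
      have hedge := pvEdges HP hv hget
      simp only [pvSF, hget]
      by_cases hch : ch = []
      · simp [hch]
      · simp only [hch, if_false]
        apply List.flatMap_congr
        intro c hc
        have he := hedge c (List.mem_reverse.mp hc)
        rw [IH (f₂ := f₂') he.1 (by omega) (by omega)]

theorem pvS_leaf {tasks : List (String × List String)} {v : String}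
    (hget : (PySem.Dict.mk tasks).get? v = some []) : pvS tasks v = [[v]] := by
  simp [pvS, pvSF, hget]

theorem pvS_node {tasks : List (String × List String)} (HP : Pre_find_longest_paths tasks)
    {v : String} (hv : v ∈ pvReach tasks) {ch : List String}
    (hget : (PySem.Dict.mk tasks).get? v = some ch) (hch : ch ≠ []) :
    pvS tasks v = ch.reverse.flatMap (fun c => (pvS tasks c).map (fun s => v :: s)) := by
  have hedge := pvEdges HP hv hget
  rw [pvS]
  simp only [pvSF, hget, hch, if_false]
  apply List.flatMap_congr
  intro c hc
  have he := hedge c (List.mem_reverse.mp hc)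
  rw [pvSF_stable HP (pvRankOf tasks v) he.1 he.2 (Nat.lt_succ_self _)]
  rfl

-- every suffix path rooted at v starts with v
theorem pvS_shape {tasks : List (String × List String)} {v : String} {s : List String}
    (h : s ∈ pvS tasks v) : ∃ t, s = v :: t := by
  rw [pvS] at h
  rcases hget : (PySem.Dict.mk tasks).get? v with _ | ch <;>
    simp only [pvSF, hget] at h
  · simp at h
  · by_cases hch : ch = []
    · simp only [hch, if_pos, List.mem_singleton] at h
      exact ⟨[], by simp [h]⟩
    · simp only [hch, if_false, List.mem_flatMap, List.mem_map] at h
      obtain ⟨c, _, t, _, rfl⟩ := h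
      exact ⟨t, rfl⟩

-- unfolding equations for A's loop
theorem pvLoopA_nil (tasks : List (String × List String)) (ml : Int) (lp : List (List String)) :
    pvLoopA tasks [] ml lp = lp := by rw [pvLoopA]

theorem pvLoopA_node {tasks : List (String × List String)} {v : String} {ch : List String}
    (hget : (PySem.Dict.mk tasks).get? v = some ch) (hch : ch ≠ [])
    (hg : ch.all (fun c => pvRankOf tasks c < pvRankOf tasks v) = true)
    (p : List String) (rest : List (String × List String)) (ml : Int) (lp : List (List String)) :
    pvLoopA tasks ((v, p) :: rest) ml lp
      = pvLoopA tasks (ch.reverse.map (fun c => (c, p ++ [c])) ++ rest) ml lp := by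
  rw [pvLoopA]
  split
  · rename_i heq; rw [hget] at heq; exact absurd heq (by simp)
  · rename_i ch' heq
    rw [hget] at heq
    injection heq with heq'
    subst heq'
    rw [dif_pos hch, dif_pos hg]

theorem pvLoopA_leaf {tasks : List (String × List String)} {v : String}
    (hget : (PySem.Dict.mk tasks).get? v = some [])
    (p : List String) (rest : List (String × List String)) (ml : Int) (lp : List (List String)) :
    pvLoopA tasks ((v, p) :: rest) ml lp
      = pvLoopA tasks rest (pvStepA (ml, lp) p).1 (pvStepA (ml, lp) p).2 := by
  rw [pvLoopA]
  split
  · rename_i heq; rw [hget] at heq; exact absurd heq (by simp)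
  · rename_i ch' heq
    rw [hget] at heq
    injection heq with heq'
    subst heq'
    rw [dif_neg (by simp : ¬([] : List String) ≠ [])]
    simp only [pvStepA]
    split_ifs <;> rfl

-- ===== A-side: popping a vertex folds its suffix paths into the accumulator =====
theorem pvLoopA_step {tasks : List (String × List String)} (HP : Pre_find_longest_paths tasks) :
    ∀ (n : Nat) (v : String), v ∈ pvReach tasks → pvRankOf tasks v < n →
    ∀ (p : List String) (rest : List (String × List String)) (ml : Int) (lp : List (List String)),
      pvLoopA tasks ((v, p) :: rest) ml lp
        = pvLoopA tasks rest
            (((pvS tasks v).map (fun s => p ++ s.tail)).foldl pvStepA (ml, lp)).1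
            (((pvS tasks v).map (fun s => p ++ s.tail)).foldl pvStepA (ml, lp)).2 := by
  intro n
  induction n with
  | zero => intro v _ hr; omega
  | succ n IH =>
    intro v hv hr p rest ml lp
    obtain ⟨ch, hget⟩ := pvGet_of_mem_keys (pvReach_keys HP hv)
    have hedge := pvEdges HP hv hget
    by_cases hch : ch = []
    · subst hch
      rw [pvLoopA_leaf hget, pvS_leaf hget]
      simp
    · have hg := pvGuard hedge
      rw [pvLoopA_node hget hch hg p rest ml lp]
      have hseg : ∀ (l : List String),
          (∀ c ∈ l, c ∈ pvReach tasks ∧ pvRankOf tasks c < n) →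
          ∀ (rest : List (String × List String)) (s : Int × List (List String)),
          pvLoopA tasks (l.map (fun c => (c, p ++ [c])) ++ rest) s.1 s.2
            = pvLoopA tasks rest
                (l.foldl (fun s c => ((pvS tasks c).map (fun t => p ++ t)).foldl pvStepA s) s).1
                (l.foldl (fun s c => ((pvS tasks c).map (fun t => p ++ t)).foldl pvStepA s) s).2 := by
        intro l
        induction l with
        | nil => intro _ rest s; simp
        | cons c cs ihl =>
          intro hl rest s
          have hc := hl c (by simp)
          have hstep := IH c hc.1 hc.2 (p ++ [c])
            (cs.map (fun c => (c, p ++ [c])) ++ rest) s.1 s.2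
          have hmapc : (pvS tasks c).map (fun t => (p ++ [c]) ++ t.tail)
              = (pvS tasks c).map (fun t => p ++ t) := by
            apply List.map_congr_left
            intro t ht
            obtain ⟨t', rfl⟩ := pvS_shape ht
            simp
          simp only [List.map_cons, List.cons_append] at hstep ⊢
          rw [hstep, hmapc]
          exact ihl (fun c' hc' => hl c' (by simp [hc'])) rest _
      have hl : ∀ c ∈ ch.reverse, c ∈ pvReach tasks ∧ pvRankOf tasks c < n := by
        intro c hc
        have := hedge c (List.mem_reverse.mp hc)
        exact ⟨this.1, by omega⟩
      rw [hseg ch.reverse hl rest (ml, lp)]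
      have hconv : ((pvS tasks v).map (fun s => p ++ s.tail)).foldl pvStepA (ml, lp)
          = ch.reverse.foldl
              (fun s c => ((pvS tasks c).map (fun t => p ++ t)).foldl pvStepA s) (ml, lp) := by
        rw [pvS_node HP hv hget hch, List.map_flatMap, List.foldl_flatMap]
        congr 1
        funext s c
        simp [List.map_map, Function.comp_def]
      rw [hconv]

theorem pvContains_start {tasks : List (String × List String)}
    (HP : Pre_find_longest_paths tasks) :
    (PySem.Dict.mk tasks).contains "Start" = true := by
  rw [PySem.Dict.contains_iff_mem_keys]
  simpa [pvKeys] using HP.1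

-- identity used at the root: paths rooted at v already start with v
theorem pvMap_root {tasks : List (String × List String)} (v : String) :
    (pvS tasks v).map (fun s => [v] ++ s.tail) = pvS tasks v := by
  have := List.map_congr_left (l := pvS tasks v)
    (f := fun s => [v] ++ s.tail) (g := fun s => s) ?_
  · simpa using this
  · intro s hs
    obtain ⟨t, rfl⟩ := pvS_shape hs
    simp

theorem pvA_val {tasks : List (String × List String)} (HP : Pre_find_longest_paths tasks) :
    find_longest_paths tasks = ((pvS tasks "Start").foldl pvStepA (0, [])).2 := by
  unfold find_longest_paths
  rw [pvContains_start HP]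
  simp only [Bool.true_eq_false, if_false]
  rw [pvLoopA_step HP (pvRankOf tasks "Start" + 1) "Start" HP.2.1 (by omega), pvLoopA_nil]
  rw [show ["Start"] = [("Start" : String)] from rfl, pvMap_root]

-- ===== B-side: the fueled dfs folds the suffix paths into the state =====
theorem pvDfsF_eq {tasks : List (String × List String)} (HP : Pre_find_longest_paths tasks) :
    ∀ (f : Nat) (v : String), v ∈ pvReach tasks → pvRankOf tasks v < f →
    ∀ (path : List String) (st : Int × List (List String)),
      pvDfsF tasks f v path st
        = ((pvS tasks v).map (fun s => path ++ s.tail)).foldl pvStepA st := by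
  intro f
  induction f with
  | zero => intro v _ hr; omega
  | succ f IH =>
    intro v hv hr path st
    obtain ⟨ch, hget⟩ := pvGet_of_mem_keys (pvReach_keys HP hv)
    have hedge := pvEdges HP hv hget
    by_cases hch : ch = []
    · subst hch
      rw [pvS_leaf hget]
      simp only [pvDfsF, hget, ne_eq, not_true_eq_false, if_false,
        List.map_cons, List.map_nil, List.foldl_cons, List.foldl_nil, pvStepA]
      simp
    · have hinner : ∀ (st : Int × List (List String)),
          ch.reverse.foldl (fun s c => pvDfsF tasks f c (path ++ [c]) s) st
            = ch.reverse.foldl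
                (fun s c => ((pvS tasks c).map (fun t => path ++ t)).foldl pvStepA s) st := by
        intro st
        apply PySem.List.foldl_congr_mem
        intro acc c hc
        have he := hedge c (List.mem_reverse.mp hc)
        rw [IH c he.1 (by omega) (path ++ [c]) acc]
        congr 1
        apply List.map_congr_left
        intro t ht
        obtain ⟨t', rfl⟩ := pvS_shape ht
        simp
      simp only [pvDfsF, hget, hch, ne_eq, not_false_eq_true, if_true]
      rw [hinner]
      rw [pvS_node HP hv hget hch, List.map_flatMap, List.foldl_flatMap]
      congr 1
      funext s c
      simp [List.map_map, Function.comp_def]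

theorem pvB_val {tasks : List (String × List String)} (HP : Pre_find_longest_paths tasks) :
    find_longest_paths_alt tasks = ((pvS tasks "Start").foldl pvStepA (0, [])).2 := by
  unfold find_longest_paths_alt
  rw [pvContains_start HP]
  simp only [Bool.true_eq_false, if_false]
  rw [pvDfsF_eq HP (pvRankOf tasks "Start" + 1) "Start" HP.2.1 (by omega)]
  rw [show ["Start"] = [("Start" : String)] from rfl, pvMap_root]

-- ===== VERDICT (by name: the statement is the Claim_ definition above) =====
theorem find_longest_paths_spec : Claim_equal_find_longest_paths := by
  intro tasks _ HP
  unfold Spec_find_longest_paths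
  rw [pvA_val HP, pvB_val HP]
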